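-- pv_equiv track=rewrite | github.com/eventdips/eventdips-django | teacherview/views.py | get_search_accuracy
-- ===== SOURCE A (Python) =====
-- def get_search_accuracy(query, result):
--     result = str(result)
--     computed_accuracy = 0
--     if query in result:
--         computed_accuracy = 100
--     elif query.lower() in result.lower():
--         ind = result.lower().index(query.lower())
--         substring = result[ind: ind+len(query)]
--         computed_accuracy = 90
--     else:
--         for occurence_index in [ind for (ind, char) in enumerate(result) if char.lower() == query[0].lower()]:
--             loss, ctr, substring = 0, 0, ''
--             for ind in range(occurence_index, len(result)):
--                 if ctr >= len(query):
--                     break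
--                 elif query[ctr].lower() == result[ind].lower():
--                     substring += result[ind]
--                     ctr += 1
--                 else:
--                     loss += 1
--             instance_accuracy = 0
--             if substring.lower() == query.lower():
--                 instance_accuracy = 80-(loss*30)
--             if instance_accuracy > computed_accuracy:
--                 computed_accuracy = instance_accuracy
--     return round(computed_accuracy, 2)
-- ===== SOURCE B (Python) =====
-- def get_search_accuracy(query, result):
--     result = str(result)
--     if query in result:
--         return 100
--     ql = query.lower()
--     rl = result.lower()
--     if ql in rl:
--         return 90
--     n = len(rl)
--     m = len(ql)
--     # next-occurrence jump table, built right to left: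
--     # nxt[i] maps a char c to the smallest index j >= i with rl[j] == c
--     nxt = [None] * (n + 1)
--     cur = {}
--     nxt[n] = cur
--     for i in range(n - 1, -1, -1):
--         cur = dict(cur)
--         cur[rl[i]] = i
--         nxt[i] = cur
--     first = ql[0]          # query is non-empty here ('' is in every string)
--     best = 0
--     i = nxt[0].get(first, -1)
--     while i != -1:
--         # greedy subsequence match of ql starting at i, via jumps
--         j = i
--         ok = True
--         for c in ql:
--             jj = nxt[j].get(c, -1)
--             if jj == -1:
--                 ok = False
--                 break
--             j = jj + 1
--         if ok:
--             loss = (j - i) - m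
--             if loss == 1:
--                 return 50   # minimal possible loss in this branch: early exit
--             score = 80 - 30 * loss
--             if score > best:
--                 best = score
--         i = nxt[i + 1].get(first, -1)
--     return best
-- ===== Notes on version B (the rewrite author's own statement) =====
-- stated objective: faster
-- what changed: Replaces A's per-occurrence linear rescan of the whole result tail with a next-occurrence jump table (one dict per position, built right to left) so each candidate start is checked with len(query) O(1) jumps, plus an early exit when the minimal possible loss (score 50) is found.
import Mathlib
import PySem

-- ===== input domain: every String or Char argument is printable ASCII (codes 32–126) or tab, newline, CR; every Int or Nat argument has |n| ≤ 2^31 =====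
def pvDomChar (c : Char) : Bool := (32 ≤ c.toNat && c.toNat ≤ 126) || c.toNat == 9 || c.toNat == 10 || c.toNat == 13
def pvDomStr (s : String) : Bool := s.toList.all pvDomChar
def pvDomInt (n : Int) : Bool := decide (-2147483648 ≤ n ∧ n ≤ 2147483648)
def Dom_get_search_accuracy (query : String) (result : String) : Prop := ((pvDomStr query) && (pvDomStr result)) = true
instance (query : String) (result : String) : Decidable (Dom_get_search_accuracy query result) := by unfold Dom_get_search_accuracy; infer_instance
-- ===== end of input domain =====

-- B replaces A's per-start linear rescan of the result tail by a next-occurrence jump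
-- table chased per candidate start, with an early exit at the minimal achievable loss.

-- ===== PORT A =====
-- inner 'for ind in range(occurence_index, len(result))' loop with its break,
-- state (loss, ctr, substring); returns the final (loss, substring)
def pvAScan (qc rc : List Char) (ind loss ctr : Nat) (sub : List Char) : Nat × List Char :=
  if ind < rc.length then
    if qc.length ≤ ctr then (loss, sub)
    else if PySem.Chars.lowerChar (PySem.List.pyGetD qc (ctr : Int) ' ')
            = PySem.Chars.lowerChar (PySem.List.pyGetD rc (ind : Int) ' ') then
      pvAScan qc rc (ind + 1) loss (ctr + 1) (sub ++ [PySem.List.pyGetD rc (ind : Int) ' '])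
    else
      pvAScan qc rc (ind + 1) (loss + 1) ctr sub
  else (loss, sub)
termination_by rc.length - ind


def get_search_accuracy (query : String) (result : String) : Int :=
  -- result = str(result) is the identity on a str argument
  if PySem.Str.isIn query result then (100 : Int)
  else if PySem.Str.isIn (PySem.Str.lower query) (PySem.Str.lower result) then
    -- (A computes ind / substring here but never uses them; computed_accuracy = 90)
    (90 : Int)
  else
    let qc := query.toList
    let rc := result.toList
    let occs := ((PySem.List.enumerate rc 0).filter
      (fun p => PySem.Chars.lowerChar p.2 = PySem.Chars.lowerChar (PySem.List.pyGetD qc 0 ' '))).map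
      (fun p => p.1)
    occs.foldl (fun computed occ =>
      let s := pvAScan qc rc occ.toNat 0 0 []
      let instAcc : Int :=
        if PySem.Chars.lower s.2 = PySem.Chars.lower qc then 80 - 30 * (s.1 : Int) else 0
      if computed < instAcc then instAcc else computed) 0
    -- round(int, 2) = int

-- ===== PORT B =====
-- 'for i in range(n-1, -1, -1): cur = dict(cur); cur[rl[i]] = i; nxt[i] = cur'
def pvBNxtLoop (rl : List Char) : Nat → PySem.Dict Char Nat → List (PySem.Dict Char Nat) →
    List (PySem.Dict Char Nat)
  | 0, _, acc => acc
  | i + 1, cur, acc =>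
    let cur' := cur.insert (rl.getD i ' ') i
    pvBNxtLoop rl i cur' (cur' :: acc)

-- 'for c in ql: jj = nxt[j].get(c, -1); …; j = jj + 1' (none models jj == -1 / ok = False)
def pvBChase (nxt : List (PySem.Dict Char Nat)) : List Char → Nat → Option Nat
  | [], j => some j
  | c :: rest, j =>
    match (nxt.getD j PySem.Dict.empty).get? c with
    | none => none
    | some jj => pvBChase nxt rest (jj + 1)

-- the 'while i != -1' loop; fuel only makes the recursion total (the chain is increasing)
def pvBLoop (nxt : List (PySem.Dict Char Nat)) (ql : List Char) (first : Char) (m : Nat) :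
    Nat → Nat → Int → Int
  | 0, _, best => best
  | fuel + 1, i, best =>
    match pvBChase nxt ql i with
    | some j =>
      let loss : Int := (j : Int) - (i : Int) - (m : Int)
      if loss = 1 then 50
      else
        let score := 80 - 30 * loss
        let best' := if best < score then score else best
        match (nxt.getD (i + 1) PySem.Dict.empty).get? first with
        | none => best'
        | some i' => pvBLoop nxt ql first m fuel i' best'
    | none =>
      match (nxt.getD (i + 1) PySem.Dict.empty).get? first with
      | none => best
      | some i' => pvBLoop nxt ql first m fuel i' best


def get_search_accuracy_alt (query : String) (result : String) : Int :=
  if PySem.Str.isIn query result then (100 : Int)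
  else if PySem.Str.isIn (PySem.Str.lower query) (PySem.Str.lower result) then (90 : Int)
  else
    let ql := (PySem.Str.lower query).toList
    let rl := (PySem.Str.lower result).toList
    let n := rl.length
    let m := ql.length
    let nxt := pvBNxtLoop rl n PySem.Dict.empty [PySem.Dict.empty]
    let first := PySem.List.pyGetD ql 0 ' '  -- query is non-empty here ('' is in every string)
    match (nxt.getD 0 PySem.Dict.empty).get? first with
    | none => 0
    | some i0 => pvBLoop nxt ql first m n i0 0

-- ===== PRECONDITION & SPEC =====
def Spec_get_search_accuracy (query : String) (result : String) (out : Int) : Prop := out = get_search_accuracy_alt query result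
instance (query : String) (result : String) (out : Int) : Decidable (Spec_get_search_accuracy query result out) := by unfold Spec_get_search_accuracy; infer_instance

-- ===== CLAIM (what is proved, stated in full; the proofs are below) =====
def Claim_equal_get_search_accuracy : Prop := ∀ (query : String) (result : String), Dom_get_search_accuracy query result → Spec_get_search_accuracy query result (get_search_accuracy query result)

-- ===== LEMMAS AND PROOFS =====

def pvFirst (rl : List Char) (c : Char) (i : Nat) : Option Nat :=
  if h : i < rl.length then
    if rl[i] = c then some i else pvFirst rl c (i + 1)
  else none
termination_by rl.length - i

theorem pvFirst_spec {rl : List Char} {c : Char} {i p : Nat} (h : pvFirst rl c i = some p) :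
    i ≤ p ∧ p < rl.length ∧ rl[p]? = some c := by
  fun_induction pvFirst rl c i with
  | case1 i h1 h2 =>
    obtain rfl : i = p := by simpa using h
    exact ⟨le_refl _, h1, by simp [List.getElem?_eq_getElem h1, h2]⟩
  | case2 i h1 h2 ih =>
    obtain ⟨a, b, cc⟩ := ih h
    exact ⟨by omega, b, cc⟩
  | case3 i h1 => simp at h

theorem pvFirst_none {rl : List Char} {c : Char} {i : Nat} (h : rl.length ≤ i) :
    pvFirst rl c i = none := by
  unfold pvFirst; rw [dif_neg (by omega)]

def pvGreedy (rl : List Char) : List Char → Nat → Option Nat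
  | [], j => some j
  | c :: rest, j =>
    match pvFirst rl c j with
    | none => none
    | some p => pvGreedy rl rest (p + 1)

theorem pvGreedy_bounds {rl : List Char} {qs : List Char} {j r : Nat}
    (h : pvGreedy rl qs j = some r) (hj : j ≤ rl.length) :
    j + qs.length ≤ r ∧ r ≤ rl.length := by
  induction qs generalizing j with
  | nil =>
    obtain rfl : j = r := by simpa [pvGreedy] using h
    exact ⟨by simp, hj⟩
  | cons c rest ih =>
    unfold pvGreedy at h
    cases hp : pvFirst rl c j with
    | none => rw [hp] at h; simp at h
    | some p =>
      rw [hp] at h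
      obtain ⟨h1, h2, _⟩ := pvFirst_spec hp
      obtain ⟨a, b⟩ := ih h (by omega)
      constructor <;> [skip; exact b]
      simp only [List.length_cons]; omega

theorem pvGreedy_contig {rl : List Char} {qs : List Char} {j : Nat}
    (h : pvGreedy rl qs j = some (j + qs.length)) (hj : j ≤ rl.length) :
    qs <+: rl.drop j := by
  induction qs generalizing j with
  | nil => simp
  | cons c rest ih =>
    unfold pvGreedy at h
    cases hp : pvFirst rl c j with
    | none => rw [hp] at h; simp at h
    | some p =>
      rw [hp] at h
      obtain ⟨h1, h2, h3⟩ := pvFirst_spec hp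
      obtain ⟨a, b⟩ := pvGreedy_bounds h (by omega)
      have hpj : p = j := by simp at a ⊢; omega
      subst hpj
      have h' : pvGreedy rl rest (p + 1) = some (p + 1 + rest.length) := by
        have h'' : pvGreedy rl rest (p + 1) = some (p + (c :: rest).length) := h
        rw [h'']; congr 1; simp; omega
      have hrest : rest <+: rl.drop (p + 1) := ih h' (by omega)
      have hdrop : rl.drop p = c :: rl.drop (p + 1) := by
        rw [List.drop_eq_getElem_cons h2]
        simp [List.getElem?_eq_getElem h2] at h3
        simp [h3]
      rw [hdrop]
      exact (List.cons_prefix_cons).2 ⟨rfl, hrest⟩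

def pvOccs (rl : List Char) (c : Char) (i : Nat) : List Nat :=
  if h : i < rl.length then
    if rl[i] = c then i :: pvOccs rl c (i + 1) else pvOccs rl c (i + 1)
  else []
termination_by rl.length - i

theorem pvOccs_eq (rl : List Char) (c : Char) (i : Nat) :
    pvOccs rl c i = match pvFirst rl c i with
      | none => []
      | some p => p :: pvOccs rl c (p + 1) := by
  fun_induction pvOccs rl c i with
  | case1 i h1 h2 => rw [pvFirst, dif_pos h1, if_pos h2]
  | case2 i h1 h2 ih =>
    rw [show pvFirst rl c i = pvFirst rl c (i + 1) from by rw [pvFirst, dif_pos h1, if_neg h2]]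
    exact ih
  | case3 i h1 => rw [pvFirst, dif_neg h1]

theorem pvOccs_mem {rl : List Char} {c : Char} {i j : Nat} (h : j ∈ pvOccs rl c i) :
    j < rl.length := by
  fun_induction pvOccs rl c i with
  | case1 i h1 h2 ih =>
    rcases List.mem_cons.1 h with rfl | h'
    · exact h1
    · exact ih h'
  | case2 i h1 h2 ih => exact ih h
  | case3 i h1 => simp at h

theorem pvGetDIdx (l : List Char) (k : Nat) (d : Char) (h : k < l.length) :
    PySem.List.pyGetD l (k : Int) d = l[k] := by
  rw [PySem.List.pyGetD_natCast]; exact List.getD_eq_getElem l d h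


theorem pvAScan_some {qc rc : List Char} {i r : Nat} (loss0 ctr : Nat) (sub0 : List Char)
    (h : pvGreedy (rc.map PySem.Chars.lowerChar) ((qc.map PySem.Chars.lowerChar).drop ctr) i
         = some r) :
    (pvAScan qc rc i loss0 ctr sub0).1 = loss0 + ((r - i) - (qc.length - ctr)) ∧
    (pvAScan qc rc i loss0 ctr sub0).2.map PySem.Chars.lowerChar
      = sub0.map PySem.Chars.lowerChar ++ (qc.map PySem.Chars.lowerChar).drop ctr := by
  fun_induction pvAScan qc rc i loss0 ctr sub0 with
  | case1 ind loss ctr sub h1 h2 =>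
    have hdrop : (qc.map PySem.Chars.lowerChar).drop ctr = [] := by
      apply List.drop_eq_nil_of_le; simpa using h2
    rw [hdrop] at h
    obtain rfl : ind = r := by simpa [pvGreedy] using h
    refine ⟨by omega, by simp [hdrop]⟩
  | case2 ind loss ctr sub h1 h2 h3 ih =>
    have hctr : ctr < qc.length := by omega
    have hql : ctr < (qc.map PySem.Chars.lowerChar).length := by simpa using hctr
    have hdrop : (qc.map PySem.Chars.lowerChar).drop ctr
        = (qc.map PySem.Chars.lowerChar)[ctr] :: (qc.map PySem.Chars.lowerChar).drop (ctr + 1) :=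
      List.drop_eq_getElem_cons hql
    have hq : (qc.map PySem.Chars.lowerChar)[ctr]'hql = PySem.Chars.lowerChar qc[ctr] :=
      List.getElem_map ..
    have hr : (rc.map PySem.Chars.lowerChar)[ind]'(by simpa using h1)
        = PySem.Chars.lowerChar rc[ind] := List.getElem_map ..
    rw [pvGetDIdx qc ctr ' ' hctr, pvGetDIdx rc ind ' ' h1] at h3
    have heq : PySem.Chars.lowerChar qc[ctr] = PySem.Chars.lowerChar rc[ind] := h3
    have hfirst : pvFirst (rc.map PySem.Chars.lowerChar)
        ((qc.map PySem.Chars.lowerChar)[ctr]'hql) ind = some ind := by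
      rw [pvFirst, dif_pos (by simpa using h1), if_pos (by rw [hr, hq, heq])]
    rw [hdrop] at h
    unfold pvGreedy at h
    rw [hfirst] at h
    obtain ⟨ha, hb⟩ := ih h
    have hbnd := pvGreedy_bounds h (by simpa using h1)
    have hlen : ((qc.map PySem.Chars.lowerChar).drop (ctr + 1)).length
        = qc.length - (ctr + 1) := by simp
    rw [hlen] at hbnd
    constructor
    · rw [ha]; omega
    · rw [hb, hdrop]
      simp [pvGetDIdx rc ind ' ' h1, hq, heq]
  | case3 ind loss ctr sub h1 h2 h3 ih =>
    have hctr : ctr < qc.length := by omega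
    have hql : ctr < (qc.map PySem.Chars.lowerChar).length := by simpa using hctr
    have hdrop : (qc.map PySem.Chars.lowerChar).drop ctr
        = (qc.map PySem.Chars.lowerChar)[ctr] :: (qc.map PySem.Chars.lowerChar).drop (ctr + 1) :=
      List.drop_eq_getElem_cons hql
    have hq : (qc.map PySem.Chars.lowerChar)[ctr]'hql = PySem.Chars.lowerChar qc[ctr] :=
      List.getElem_map ..
    have hr : (rc.map PySem.Chars.lowerChar)[ind]'(by simpa using h1)
        = PySem.Chars.lowerChar rc[ind] := List.getElem_map ..
    rw [pvGetDIdx qc ctr ' ' hctr, pvGetDIdx rc ind ' ' h1] at h3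
    have hne : PySem.Chars.lowerChar qc[ctr] ≠ PySem.Chars.lowerChar rc[ind] := h3
    have hfirst : pvFirst (rc.map PySem.Chars.lowerChar)
        ((qc.map PySem.Chars.lowerChar)[ctr]'hql) ind
        = pvFirst (rc.map PySem.Chars.lowerChar) ((qc.map PySem.Chars.lowerChar)[ctr]'hql)
            (ind + 1) := by
      rw [pvFirst, dif_pos (by simpa using h1), if_neg (by rw [hr, hq]; exact fun e => hne e.symm)]
    rw [hdrop] at h
    unfold pvGreedy at h
    rw [hfirst] at h
    have h' : pvGreedy (rc.map PySem.Chars.lowerChar)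
        ((qc.map PySem.Chars.lowerChar).drop ctr) (ind + 1) = some r := by
      rw [hdrop]; unfold pvGreedy; exact h
    obtain ⟨ha, hb⟩ := ih h'
    have hbnd := pvGreedy_bounds h' (by simp; omega)
    have hlen : ((qc.map PySem.Chars.lowerChar).drop ctr).length = qc.length - ctr := by simp
    rw [hlen] at hbnd
    exact ⟨by rw [ha]; omega, by rw [hb]⟩
  | case4 ind loss ctr sub h1 =>
    by_cases hd : (qc.map PySem.Chars.lowerChar).drop ctr = []
    · rw [hd] at h
      obtain rfl : ind = r := by simpa [pvGreedy] using h
      have : qc.length ≤ ctr := by simpa using (List.drop_eq_nil_iff).1 hd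
      exact ⟨by omega, by simp [hd]⟩
    · exfalso
      obtain ⟨c, rest, hcr⟩ := List.exists_cons_of_ne_nil hd
      rw [hcr] at h
      unfold pvGreedy at h
      rw [pvFirst_none (by simp; omega)] at h
      simp at h

theorem pvAScan_none {qc rc : List Char} {i : Nat} (loss0 ctr : Nat) (sub0 : List Char)
    (h : pvGreedy (rc.map PySem.Chars.lowerChar) ((qc.map PySem.Chars.lowerChar).drop ctr) i
         = none) :
    (pvAScan qc rc i loss0 ctr sub0).2.length < sub0.length + (qc.length - ctr) := by
  fun_induction pvAScan qc rc i loss0 ctr sub0 with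
  | case1 ind loss ctr sub h1 h2 =>
    exfalso
    rw [List.drop_eq_nil_of_le (by simpa using h2)] at h
    simp [pvGreedy] at h
  | case2 ind loss ctr sub h1 h2 h3 ih =>
    have hctr : ctr < qc.length := by omega
    have hql : ctr < (qc.map PySem.Chars.lowerChar).length := by simpa using hctr
    have hdrop : (qc.map PySem.Chars.lowerChar).drop ctr
        = (qc.map PySem.Chars.lowerChar)[ctr] :: (qc.map PySem.Chars.lowerChar).drop (ctr + 1) :=
      List.drop_eq_getElem_cons hql
    have hq : (qc.map PySem.Chars.lowerChar)[ctr]'hql = PySem.Chars.lowerChar qc[ctr] :=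
      List.getElem_map ..
    have hr : (rc.map PySem.Chars.lowerChar)[ind]'(by simpa using h1)
        = PySem.Chars.lowerChar rc[ind] := List.getElem_map ..
    rw [pvGetDIdx qc ctr ' ' hctr, pvGetDIdx rc ind ' ' h1] at h3
    have hfirst : pvFirst (rc.map PySem.Chars.lowerChar)
        ((qc.map PySem.Chars.lowerChar)[ctr]'hql) ind = some ind := by
      rw [pvFirst, dif_pos (by simpa using h1), if_pos (by rw [hr, hq, h3])]
    rw [hdrop] at h
    unfold pvGreedy at h
    rw [hfirst] at h
    have := ih h
    simp only [List.length_append, List.length_cons, List.length_nil] at this ⊢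
    omega
  | case3 ind loss ctr sub h1 h2 h3 ih =>
    have hctr : ctr < qc.length := by omega
    have hql : ctr < (qc.map PySem.Chars.lowerChar).length := by simpa using hctr
    have hdrop : (qc.map PySem.Chars.lowerChar).drop ctr
        = (qc.map PySem.Chars.lowerChar)[ctr] :: (qc.map PySem.Chars.lowerChar).drop (ctr + 1) :=
      List.drop_eq_getElem_cons hql
    have hq : (qc.map PySem.Chars.lowerChar)[ctr]'hql = PySem.Chars.lowerChar qc[ctr] :=
      List.getElem_map ..
    have hr : (rc.map PySem.Chars.lowerChar)[ind]'(by simpa using h1)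
        = PySem.Chars.lowerChar rc[ind] := List.getElem_map ..
    rw [pvGetDIdx qc ctr ' ' hctr, pvGetDIdx rc ind ' ' h1] at h3
    have hfirst : pvFirst (rc.map PySem.Chars.lowerChar)
        ((qc.map PySem.Chars.lowerChar)[ctr]'hql) ind
        = pvFirst (rc.map PySem.Chars.lowerChar) ((qc.map PySem.Chars.lowerChar)[ctr]'hql)
            (ind + 1) := by
      rw [pvFirst, dif_pos (by simpa using h1), if_neg (by rw [hr, hq]; exact fun e => h3 e.symm)]
    rw [hdrop] at h
    unfold pvGreedy at h
    rw [hfirst] at h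
    apply ih
    rw [hdrop]; unfold pvGreedy; exact h
  | case4 ind loss ctr sub h1 =>
    by_cases hd : (qc.map PySem.Chars.lowerChar).drop ctr = []
    · exfalso; rw [hd] at h; simp [pvGreedy] at h
    · have : ctr < qc.length := by
        by_contra hc
        exact hd (List.drop_eq_nil_of_le (by simp; omega))
      simp; omega


theorem pvBNxtLoop_inv (rl : List Char) (i : Nat) (cur : PySem.Dict Char Nat)
    (acc : List (PySem.Dict Char Nat)) (hi : i ≤ rl.length)
    (hcur : ∀ c, cur.get? c = pvFirst rl c i)
    (hacc : ∀ t c, ((acc.getD t PySem.Dict.empty).get? c) = pvFirst rl c (i + t)) :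
    ∀ t c, (((pvBNxtLoop rl i cur acc).getD t PySem.Dict.empty).get? c) = pvFirst rl c t := by
  induction i generalizing cur acc with
  | zero => simpa using hacc
  | succ i ih =>
    show ∀ t c, (((pvBNxtLoop rl i (cur.insert (rl.getD i ' ') i)
        ((cur.insert (rl.getD i ' ') i) :: acc)).getD t PySem.Dict.empty).get? c) = pvFirst rl c t
    have hlt : i < rl.length := by omega
    have hgd : rl.getD i ' ' = rl[i] := List.getD_eq_getElem rl ' ' hlt
    have hcur' : ∀ c, (cur.insert (rl.getD i ' ') i).get? c = pvFirst rl c i := by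
      intro c
      rw [PySem.Dict.get?_insert, hgd]
      rw [pvFirst, dif_pos hlt]
      by_cases hc : c = rl[i]
      · rw [if_pos hc, if_pos hc.symm]
      · rw [if_neg hc, if_neg (fun e => hc e.symm), hcur c]
    apply ih _ _ (by omega) hcur'
    intro t c
    cases t with
    | zero => simpa using hcur' c
    | succ t =>
      have := hacc t c
      simpa [Nat.add_assoc, Nat.add_comm 1 t, Nat.add_left_comm] using this

theorem pvBNxt_spec (rl : List Char) (j : Nat) (c : Char) :
    ((pvBNxtLoop rl rl.length PySem.Dict.empty [PySem.Dict.empty]).getD j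
      PySem.Dict.empty).get? c = pvFirst rl c j := by
  apply pvBNxtLoop_inv rl rl.length PySem.Dict.empty [PySem.Dict.empty] (le_refl _)
  · intro c; rw [PySem.Dict.get?_empty, pvFirst_none (le_refl _)]
  · intro t c
    have h1 : rl.length ≤ rl.length + t := by omega
    cases t with
    | zero => simpa [PySem.Dict.get?_empty] using (pvFirst_none (c := c) h1).symm
    | succ t => simpa [PySem.Dict.get?_empty] using (pvFirst_none (c := c) h1).symm


theorem pvBChase_eq (rl : List Char) (qs : List Char) (j : Nat) :
    pvBChase (pvBNxtLoop rl rl.length PySem.Dict.empty [PySem.Dict.empty]) qs j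
      = pvGreedy rl qs j := by
  induction qs generalizing j with
  | nil => rfl
  | cons c rest ih =>
    show (match (_ : Option Nat) with | none => none | some jj => _) = _
    rw [pvBNxt_spec rl j c]
    unfold pvGreedy
    cases pvFirst rl c j with
    | none => rfl
    | some p => exact ih (p + 1)

def pvScore (rl ql : List Char) (i : Nat) : Int :=
  match pvGreedy rl ql i with
  | some r => 80 - 30 * ((r : Int) - (i : Int) - (ql.length : Int))
  | none => 0


theorem pvIfMax (b s : Int) : (if b < s then s else b) = max b s := by
  rw [max_def]; split_ifs <;> omega

theorem pvFoldMaxLe {l : List Int} {b B : Int} (hl : ∀ x ∈ l, x ≤ B) (hb : b ≤ B) :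
    l.foldl max b ≤ B := by
  rcases PySem.List.foldl_max_mem l b with h | h
  · rw [h]; exact hb
  · exact hl _ h

theorem pvBLoop_eq (rl ql : List Char) (first : Char) (i : Nat) (best : Int) (fuel : Nat)
    (hsc : ∀ j, pvScore rl ql j ≤ 50)
    (hi : i < rl.length) (hfuel : rl.length - i ≤ fuel) (hb0 : 0 ≤ best) (hb : best ≤ 50) :
    pvBLoop (pvBNxtLoop rl rl.length PySem.Dict.empty [PySem.Dict.empty]) ql first ql.length
        fuel i best
      = ((i :: pvOccs rl first (i + 1)).map (pvScore rl ql)).foldl max best := by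
  induction fuel generalizing i best with
  | zero => omega
  | succ fuel ih =>
    show (match pvBChase _ ql i with
      | some j => _
      | none => _) = _
    rw [pvBChase_eq rl ql i]
    simp only [List.map_cons, List.foldl_cons]
    cases hg : pvGreedy rl ql i with
    | some r =>
      dsimp only
      have hscore : pvScore rl ql i
          = 80 - 30 * ((r : Int) - (i : Int) - (ql.length : Int)) := by
        unfold pvScore; rw [hg]
      by_cases hloss : ((r : Int) - (i : Int) - (ql.length : Int)) = 1
      · rw [if_pos hloss]
        have h50 : pvScore rl ql i = 50 := by rw [hscore, hloss]; ring
        rw [h50]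
        have hmax : max best (50 : Int) = 50 := by omega
        rw [hmax]
        have hge := (PySem.List.le_foldl_max ((pvOccs rl first (i + 1)).map (pvScore rl ql))
          (50 : Int)).1
        have hle : ((pvOccs rl first (i + 1)).map (pvScore rl ql)).foldl max 50 ≤ 50 := by
          apply pvFoldMaxLe _ (le_refl _)
          intro x hx
          obtain ⟨j, _, rfl⟩ := List.mem_map.1 hx
          exact hsc j
        omega
      · rw [if_neg hloss]
        simp only [pvIfMax]
        rw [← hscore]
        rw [pvBNxt_spec rl (i + 1) first]
        have hb' : max best (pvScore rl ql i) ≤ 50 := by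
          have := hsc i; omega
        have hb0' : 0 ≤ max best (pvScore rl ql i) := le_trans hb0 (le_max_left _ _)
        rw [pvOccs_eq rl first (i + 1)]
        cases hf : pvFirst rl first (i + 1) with
        | none => simp
        | some i' =>
          obtain ⟨hi1, hi2, _⟩ := pvFirst_spec hf
          simp only [List.map_cons, List.foldl_cons]
          rw [ih i' (max best (pvScore rl ql i)) hi2 (by omega) hb0' hb']
          simp
    | none =>
      dsimp only
      have hscore : pvScore rl ql i = 0 := by unfold pvScore; rw [hg]
      rw [hscore]
      have hmax : max best (0 : Int) = best := by omega
      rw [hmax]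
      rw [pvBNxt_spec rl (i + 1) first]
      rw [pvOccs_eq rl first (i + 1)]
      cases hf : pvFirst rl first (i + 1) with
      | none => simp
      | some i' =>
        obtain ⟨hi1, hi2, _⟩ := pvFirst_spec hf
        simp only [List.map_cons, List.foldl_cons]
        rw [ih i' best hi2 (by omega) hb0 hb]
        simp

theorem pvScore_le (rl ql : List Char) (hql : ql ≠ []) (hinf : ¬ ql <:+: rl) :
    ∀ j, pvScore rl ql j ≤ 50 := by
  intro j
  unfold pvScore
  cases hg : pvGreedy rl ql j with
  | none => dsimp only; omega
  | some r =>
    dsimp only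
    by_cases hj : j ≤ rl.length
    · obtain ⟨h1, h2⟩ := pvGreedy_bounds hg hj
      by_cases hr : r = j + ql.length
      · exact absurd ((pvGreedy_contig (hr ▸ hg) hj).isInfix.trans
          (List.drop_suffix j rl).isInfix) hinf
      · have : j + ql.length + 1 ≤ r := by omega
        have : (80 : Int) - 30 * ((r : Int) - (j : Int) - (ql.length : Int)) ≤ 50 := by
          have hc : (1 : Int) ≤ (r : Int) - (j : Int) - (ql.length : Int) := by omega
          omega
        simpa using this
    · exfalso
      obtain ⟨c, rest, rfl⟩ := List.exists_cons_of_ne_nil hql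
      unfold pvGreedy at hg
      rw [pvFirst_none (by omega)] at hg
      simp at hg

theorem pvEnumOccs (rc : List Char) (ch : Char) (k : Nat) :
    (((PySem.List.enumerate (rc.drop k) (k : Int)).filter
        (fun p => PySem.Chars.lowerChar p.2 = ch)).map (fun p => p.1))
      = (pvOccs (rc.map PySem.Chars.lowerChar) ch k).map (fun (j : Nat) => (j : Int)) := by
  have hlen : (rc.map PySem.Chars.lowerChar).length = rc.length := by simp
  fun_induction pvOccs (rc.map PySem.Chars.lowerChar) ch k with
  | case1 k h1 h2 ih =>
    have hk : k < rc.length := by omega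
    rw [List.drop_eq_getElem_cons hk, PySem.List.enumerate_cons]
    have hch : PySem.Chars.lowerChar rc[k] = ch := by
      rw [← List.getElem_map (f := PySem.Chars.lowerChar) (h := h1)]; exact h2
    have hcast : ((k : Int) + 1) = (((k + 1 : Nat)) : Int) := by push_cast; ring
    rw [List.filter_cons]
    have ih' := ih
    rw [← hcast] at ih'
    simp [hch]
    simpa using ih'
  | case2 k h1 h2 ih =>
    have hk : k < rc.length := by omega
    rw [List.drop_eq_getElem_cons hk, PySem.List.enumerate_cons]
    have hch : ¬ PySem.Chars.lowerChar rc[k] = ch := by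
      rw [← List.getElem_map (f := PySem.Chars.lowerChar) (h := h1)]; exact h2
    have hcast : ((k : Int) + 1) = (((k + 1 : Nat)) : Int) := by push_cast; ring
    rw [List.filter_cons]
    have ih' := ih
    rw [← hcast] at ih'
    simp [hch]
    simpa using ih'
  | case3 k h1 =>
    have hk : rc.length ≤ k := by omega
    rw [List.drop_eq_nil_of_le hk]
    rfl

theorem pvScoreA (qc rc : List Char) (j : Nat) (hj : j ≤ rc.length) :
    (if PySem.Chars.lower (pvAScan qc rc j 0 0 []).2 = PySem.Chars.lower qc
      then (80 : Int) - 30 * ((pvAScan qc rc j 0 0 []).1 : Int) else 0)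
    = pvScore (rc.map PySem.Chars.lowerChar) (qc.map PySem.Chars.lowerChar) j := by
  unfold pvScore
  cases hg : pvGreedy (rc.map PySem.Chars.lowerChar) (qc.map PySem.Chars.lowerChar) j with
  | some r =>
    dsimp only
    have hg' : pvGreedy (rc.map PySem.Chars.lowerChar)
        ((qc.map PySem.Chars.lowerChar).drop 0) j = some r := by rwa [List.drop_zero]
    obtain ⟨ha, hb⟩ := pvAScan_some 0 0 [] hg'
    have hbnd := pvGreedy_bounds hg (by simpa using hj)
    rw [List.length_map] at hbnd
    have hcond : PySem.Chars.lower (pvAScan qc rc j 0 0 []).2 = PySem.Chars.lower qc := by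
      show (pvAScan qc rc j 0 0 []).2.map PySem.Chars.lowerChar = qc.map PySem.Chars.lowerChar
      rw [hb]; simp
    rw [if_pos hcond, ha]
    have : r - j - (qc.length - 0) = r - j - qc.length := by omega
    rw [List.length_map]
    push_cast [Nat.sub_sub]
    omega
  | none =>
    dsimp only
    have hg' : pvGreedy (rc.map PySem.Chars.lowerChar)
        ((qc.map PySem.Chars.lowerChar).drop 0) j = none := by rwa [List.drop_zero]
    have hlen := pvAScan_none 0 0 [] hg'
    rw [if_neg]
    intro hcond
    have : (pvAScan qc rc j 0 0 []).2.length = qc.length := by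
      have := congrArg List.length hcond
      simpa [PySem.Chars.lower] using this
    simp at hlen
    omega

theorem pv_main (query result : String) :
    get_search_accuracy query result = get_search_accuracy_alt query result := by
  unfold get_search_accuracy get_search_accuracy_alt
  by_cases h1 : PySem.Str.isIn query result
  · rw [if_pos h1, if_pos h1]
  · rw [if_neg h1, if_neg h1]
    by_cases h2 : PySem.Str.isIn (PySem.Str.lower query) (PySem.Str.lower result)
    · rw [if_pos h2, if_pos h2]
    · rw [if_neg h2, if_neg h2]
      dsimp only
      have hq : (PySem.Str.lower query).toList
          = query.toList.map PySem.Chars.lowerChar := by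
        rw [PySem.Str.toList_lower]; rfl
      have hr : (PySem.Str.lower result).toList
          = result.toList.map PySem.Chars.lowerChar := by
        rw [PySem.Str.toList_lower]; rfl
      rw [hq, hr]
      set qc := query.toList with hqc
      set rc := result.toList with hrc
      set rl := rc.map PySem.Chars.lowerChar with hrl
      set ql := qc.map PySem.Chars.lowerChar with hql
      have hqcne : qc ≠ [] := by
        intro hnil
        apply h1
        rw [PySem.Str.isIn_eq, ← hqc, hnil, PySem.Chars.isIn_nil]
      have hqlne : ql ≠ [] := by
        rw [hql]; simpa using hqcne
      have hinf : ¬ ql <:+: rl := by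
        intro hin
        apply h2
        rw [PySem.Str.isIn_eq, hq, hr]
        exact (PySem.Chars.isIn_iff_infix ql rl).2 hin
      obtain ⟨c, t, hct⟩ := List.exists_cons_of_ne_nil hqcne
      have hfirst : PySem.List.pyGetD ql 0 ' '
          = PySem.Chars.lowerChar (PySem.List.pyGetD qc 0 ' ') := by
        rw [hql, hct]
        simp [PySem.List.pyGetD, PySem.List.pyGet?, PySem.List.pyIdx?]
      set ch := PySem.Chars.lowerChar (PySem.List.pyGetD qc 0 ' ') with hch
      rw [hfirst]
      have hoccs : ((PySem.List.enumerate rc 0).filter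
            (fun p => PySem.Chars.lowerChar p.2 = ch)).map (fun p => p.1)
          = (pvOccs rl ch 0).map (fun (j : Nat) => (j : Int)) := by
        have h := pvEnumOccs rc ch 0
        rwa [List.drop_zero, Nat.cast_zero] at h
      rw [hoccs, List.foldl_map]
      have hsc : ∀ j, pvScore rl ql j ≤ 50 := pvScore_le rl ql hqlne hinf
      have hlen : rl.length = rc.length := by rw [hrl]; simp
      rw [PySem.List.foldl_congr_mem (pvOccs rl ch 0) _
        (fun acc j => max acc (pvScore rl ql j)) 0 ?hcg]
      case hcg =>
        intro acc j hj
        have hjlt : j < rc.length := hlen ▸ pvOccs_mem hj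
        dsimp only
        rw [Int.toNat_natCast]
        rw [pvScoreA qc rc j (by omega), pvIfMax]
      rw [← List.foldl_map (f := pvScore rl ql) (g := max) (l := pvOccs rl ch 0) (init := (0:Int))]
      rw [pvBNxt_spec rl 0 ch]
      rw [pvOccs_eq rl ch 0]
      cases hf : pvFirst rl ch 0 with
      | none => rfl
      | some i0 =>
        dsimp only
        obtain ⟨_, hi0, _⟩ := pvFirst_spec hf
        rw [pvBLoop_eq rl ql ch i0 0 rl.length hsc hi0 (by omega) (by omega) (by omega)]

-- ===== VERDICT (by name: the statement is the Claim_ definition above) =====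
theorem get_search_accuracy_spec : Claim_equal_get_search_accuracy := by
  intro query result _
  exact pv_main query result
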